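-- pv_equiv track=rewrite | github.com/RomanGod6/Azure-Based-PII-Redactor | enhanced_ml_detector.py | _determine_validation_context
-- ===== SOURCE A (Python) =====
-- def _determine_validation_context(column_name: str, text: str) -> str:
--     """Determine the best validation context"""
--     col_lower = column_name.lower()
--
--     if any(term in col_lower for term in ['zendesk', 'ticket', 'support', 'case']):
--         return 'zendesk'
--     elif any(term in col_lower for term in ['comment', 'description', 'note', 'body']):
--         return 'support_ticket'
--     elif any(term in col_lower for term in ['customer', 'client', 'contact']):
--         return 'customer_data'
--     else:
--         return 'general'
-- ===== SOURCE B (Python) =====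
-- _KEYWORD_PRIORITY = {
--     'zendesk': 0, 'ticket': 0, 'support': 0, 'case': 0,
--     'comment': 1, 'description': 1, 'note': 1, 'body': 1,
--     'customer': 2, 'client': 2, 'contact': 2,
-- }
-- _CONTEXTS = ['zendesk', 'support_ticket', 'customer_data']
--
-- def _determine_validation_context(column_name: str, text: str) -> str:
--     col = column_name.lower()
--     best = min((p for kw, p in _KEYWORD_PRIORITY.items() if kw in col), default=None)
--     return 'general' if best is None else _CONTEXTS[best]
-- ===== Notes on version B (the rewrite author's own statement) =====
-- stated objective: idiomatic
-- what changed: Instead of A's early-return if/elif chain over three keyword groups, B uses a flat keyword-to-priority map, collects the priorities of all matching keywords, takes their minimum and indexes a context table; correct because the minimum priority equals the first group the chain would hit.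
import Mathlib
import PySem

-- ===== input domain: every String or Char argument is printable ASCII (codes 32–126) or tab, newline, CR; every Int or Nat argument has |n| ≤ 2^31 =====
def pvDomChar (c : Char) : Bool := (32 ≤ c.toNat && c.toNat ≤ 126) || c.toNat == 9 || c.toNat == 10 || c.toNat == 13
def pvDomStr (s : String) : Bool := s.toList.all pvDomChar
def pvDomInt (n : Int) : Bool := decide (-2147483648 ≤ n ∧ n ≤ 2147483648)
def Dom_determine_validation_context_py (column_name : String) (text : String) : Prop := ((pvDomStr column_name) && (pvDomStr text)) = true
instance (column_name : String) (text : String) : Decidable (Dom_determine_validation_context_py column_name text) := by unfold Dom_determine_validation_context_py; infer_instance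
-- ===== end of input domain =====

-- B replaces A's early-return if/elif chain of group tests by a flat keyword→priority map: it collects
-- the priorities of ALL matching keywords, takes their minimum and indexes a context table (idiomatic; same cost).

-- ===== PORT A =====
def determine_validation_context_py (column_name : String) (text : String) : String :=
  let col_lower := PySem.Str.lower column_name
  if ["zendesk", "ticket", "support", "case"].any (fun term => PySem.Str.isIn term col_lower) then
    "zendesk"
  else if ["comment", "description", "note", "body"].any (fun term => PySem.Str.isIn term col_lower) then
    "support_ticket"
  else if ["customer", "client", "contact"].any (fun term => PySem.Str.isIn term col_lower) then
    "customer_data"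
  else
    "general"

-- ===== PORT B =====
def pvKeywordPriority : List (String × Nat) :=
  [("zendesk", 0), ("ticket", 0), ("support", 0), ("case", 0),
   ("comment", 1), ("description", 1), ("note", 1), ("body", 1),
   ("customer", 2), ("client", 2), ("contact", 2)]

def pvContexts : List String := ["zendesk", "support_ticket", "customer_data"]

-- min(p for kw, p in _KEYWORD_PRIORITY.items() if kw in col), default=None
def pvMinMatch : List (String × Nat) → String → Option Nat
  | [], _ => none
  | (kw, p) :: rest, col =>
    let r := pvMinMatch rest col
    if PySem.Str.isIn kw col then
      some (match r with | none => p | some q => min p q)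
    else r

def determine_validation_context_py_alt (column_name : String) (text : String) : String :=
  let col := PySem.Str.lower column_name
  match pvMinMatch pvKeywordPriority col with
  | none => "general"
  | some best => (PySem.List.pyGet? pvContexts (Int.ofNat best)).getD ""  -- best ∈ {0,1,2}, always in range

-- ===== PRECONDITION & SPEC =====
def Spec_determine_validation_context_py (column_name : String) (text : String) (out : String) : Prop := out = determine_validation_context_py_alt column_name text
instance (column_name : String) (text : String) (out : String) : Decidable (Spec_determine_validation_context_py column_name text out) := by unfold Spec_determine_validation_context_py; infer_instance

-- ===== CLAIM (what is proved, stated in full; the proofs are below) =====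
def Claim_equal_determine_validation_context_py : Prop := ∀ (column_name : String) (text : String), Dom_determine_validation_context_py column_name text → Spec_determine_validation_context_py column_name text (determine_validation_context_py column_name text)

-- ===== LEMMAS AND PROOFS =====

-- ===== VERDICT (by name: the statement is the Claim_ definition above) =====
set_option maxHeartbeats 4000000 in
theorem determine_validation_context_py_spec : Claim_equal_determine_validation_context_py := by
  intro column_name text _
  unfold Spec_determine_validation_context_py determine_validation_context_py determine_validation_context_py_alt
  simp only [pvKeywordPriority, pvMinMatch, List.any_cons, List.any_nil, Bool.or_false]
  generalize PySem.Str.isIn "zendesk" (PySem.Str.lower column_name) = b1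
  generalize PySem.Str.isIn "ticket" (PySem.Str.lower column_name) = b2
  generalize PySem.Str.isIn "support" (PySem.Str.lower column_name) = b3
  generalize PySem.Str.isIn "case" (PySem.Str.lower column_name) = b4
  generalize PySem.Str.isIn "comment" (PySem.Str.lower column_name) = b5
  generalize PySem.Str.isIn "description" (PySem.Str.lower column_name) = b6
  generalize PySem.Str.isIn "note" (PySem.Str.lower column_name) = b7
  generalize PySem.Str.isIn "body" (PySem.Str.lower column_name) = b8
  generalize PySem.Str.isIn "customer" (PySem.Str.lower column_name) = b9
  generalize PySem.Str.isIn "client" (PySem.Str.lower column_name) = b10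
  generalize PySem.Str.isIn "contact" (PySem.Str.lower column_name) = b11
  revert b1 b2 b3 b4 b5 b6 b7 b8 b9 b10 b11
  decide
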